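-- pv_equiv track=rewrite | github.com/AznIronMan/logger_x | logger_x.py | substitute_characters
-- ===== SOURCE A (Python) =====
-- from typing import Any, Dict, NewType, Optional, Tuple, Union
--
-- def substitute_characters(original_str: str) -> str:
--     """
--     Substitute characters in a string with Unicode characters.
--     """
--     subs: Dict[str, str] = {
--         "[": "⟦",
--         "]": "⟧",
--         "{": "⦃",
--         "}": "⦄",
--         "(": "❨",
--         ")": "❩",
--         ",": "‚",
--         ";": "⁏",
--         "<": "❮",
--         ">": "❯",
--     }
--     formatted_str = original_str
--     for char, sub in subs.items():
--         formatted_str = formatted_str.replace(char, sub)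
--     return formatted_str
-- ===== SOURCE B (Python) =====
-- def _sub_char(c: str) -> str:
--     if c == "[":
--         return "⟦"
--     elif c == "]":
--         return "⟧"
--     elif c == "{":
--         return "⦃"
--     elif c == "}":
--         return "⦄"
--     elif c == "(":
--         return "❨"
--     elif c == ")":
--         return "❩"
--     elif c == ",":
--         return "‚"
--     elif c == ";":
--         return "⁏"
--     elif c == "<":
--         return "❮"
--     elif c == ">":
--         return "❯"
--     else:
--         return c
--
--
-- def substitute_characters(original_str: str) -> str:
--     """
--     Substitute characters in a string with Unicode characters.
--     """
--     out = []
--     for c in original_str: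
--         out.append(_sub_char(c))
--     return "".join(out)
-- ===== Notes on version B (the rewrite author's own statement) =====
-- stated objective: simpler
-- what changed: Drops the substitution dict and ten sequential full-string replace passes; instead a per-character translation function (if/elif chain) is applied in one accumulator loop over the characters.
import Mathlib
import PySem

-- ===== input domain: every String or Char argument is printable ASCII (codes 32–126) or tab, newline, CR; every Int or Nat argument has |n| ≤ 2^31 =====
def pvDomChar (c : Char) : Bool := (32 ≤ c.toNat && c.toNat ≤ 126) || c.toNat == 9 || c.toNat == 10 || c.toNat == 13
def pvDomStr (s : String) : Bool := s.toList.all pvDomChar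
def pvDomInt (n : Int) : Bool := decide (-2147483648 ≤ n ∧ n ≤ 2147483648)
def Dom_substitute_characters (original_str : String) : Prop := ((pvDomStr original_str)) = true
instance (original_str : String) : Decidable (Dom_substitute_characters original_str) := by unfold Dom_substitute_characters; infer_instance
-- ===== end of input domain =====

-- B drops the substitution dict and A's ten sequential full-string replace passes: a per-character
-- if/elif translation applied in one accumulator loop over the characters (objective: simpler).


-- ===== PORT A =====
-- the substitution dict, written verbatim in A
def pvSubsItems : List (String × String) :=
  [("[", "⟦"), ("]", "⟧"), ("{", "⦃"), ("}", "⦄"), ("(", "❨"),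
   (")", "❩"), (",", "‚"), (";", "⁏"), ("<", "❮"), (">", "❯")]

-- ten passes: for char, sub in subs.items(): formatted = formatted.replace(char, sub)
def substitute_characters (original_str : String) : String :=
  ((PySem.Dict.ofList pvSubsItems).items).foldl
    (fun formatted p => PySem.Str.replace formatted p.1 p.2) original_str

-- ===== PORT B =====
-- _sub_char: the if/elif chain of Source B (each branch returns a one-character string)
def pvSubChar (c : Char) : Char :=
  if c = '[' then '⟦'
  else if c = ']' then '⟧'
  else if c = '{' then '⦃'
  else if c = '}' then '⦄'
  else if c = '(' then '❨'
  else if c = ')' then '❩'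
  else if c = ',' then '‚'
  else if c = ';' then '⁏'
  else if c = '<' then '❮'
  else if c = '>' then '❯'
  else c

-- out = []; for c in original_str: out.append(_sub_char(c)); return "".join(out)
def substitute_characters_alt (original_str : String) : String :=
  String.ofList (original_str.toList.foldl (fun out c => out ++ [pvSubChar c]) [])

-- ===== PRECONDITION & SPEC =====
def Spec_substitute_characters (original_str : String) (out : String) : Prop := out = substitute_characters_alt original_str
instance (original_str : String) (out : String) : Decidable (Spec_substitute_characters original_str out) := by unfold Spec_substitute_characters; infer_instance

-- ===== CLAIM (what is proved, stated in full; the proofs are below) =====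
def Claim_equal_substitute_characters : Prop := ∀ (original_str : String), Dom_substitute_characters original_str → Spec_substitute_characters original_str (substitute_characters original_str)

-- ===== LEMMAS AND PROOFS =====

-- the per-character substitution seen as a one-element piece
def pvSubF (c : Char) : List Char := [pvSubChar c]

-- the generic per-key substitution step
def pvG (k : Char) (new : List Char) (c : Char) : List Char := if c = k then new else [c]

-- single-character replace is a flatMap
lemma replace_go_single (k : Char) (new : List Char) :
    ∀ (s acc : List Char),
      PySem.Chars.replace.go [k] new s.length s acc
        = acc.reverse ++ s.flatMap (pvG k new) := by
  intro s
  induction s with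
  | nil => intro acc; simp [PySem.Chars.replace.go]
  | cons c t ih =>
    intro acc
    by_cases h : c = k
    · subst h
      simpa [PySem.Chars.replace.go, List.isPrefixOf, pvG] using ih (new.reverse ++ acc)
    · have hb : (k == c) = false := by simp [Ne.symm h]
      simpa [PySem.Chars.replace.go, List.isPrefixOf, hb, pvG, h] using ih (c :: acc)

lemma replace_single (k : Char) (new s : List Char) :
    PySem.Chars.replace s [k] new = s.flatMap (pvG k new) := by
  simpa [PySem.Chars.replace] using replace_go_single k new s []

-- the chain of the ten single-character replaces that A performs
def pvChain (s : List Char) : List Char :=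
  pvSubsItems.foldl (fun acc p => PySem.Chars.replace acc p.1.toList p.2.toList) s

lemma chain_flat (s : List Char) :
    pvChain s = ((((((((((((((((((((s).flatMap (pvG '[' ['⟦']))).flatMap (pvG ']' ['⟧']))).flatMap (pvG '{' ['⦃']))).flatMap (pvG '}' ['⦄']))).flatMap (pvG '(' ['❨']))).flatMap (pvG ')' ['❩']))).flatMap (pvG ',' ['‚']))).flatMap (pvG ';' ['⁏']))).flatMap (pvG '<' ['❮']))).flatMap (pvG '>' ['❯'])) := by
  simp only [pvChain, pvSubsItems, List.foldl]
  have hk0 : ("[" : String).toList = ['['] := rfl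
  have hv0 : ("⟦" : String).toList = ['⟦'] := rfl
  have hk1 : ("]" : String).toList = [']'] := rfl
  have hv1 : ("⟧" : String).toList = ['⟧'] := rfl
  have hk2 : ("{" : String).toList = ['{'] := rfl
  have hv2 : ("⦃" : String).toList = ['⦃'] := rfl
  have hk3 : ("}" : String).toList = ['}'] := rfl
  have hv3 : ("⦄" : String).toList = ['⦄'] := rfl
  have hk4 : ("(" : String).toList = ['('] := rfl
  have hv4 : ("❨" : String).toList = ['❨'] := rfl
  have hk5 : (")" : String).toList = [')'] := rfl
  have hv5 : ("❩" : String).toList = ['❩'] := rfl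
  have hk6 : ("," : String).toList = [','] := rfl
  have hv6 : ("‚" : String).toList = ['‚'] := rfl
  have hk7 : (";" : String).toList = [';'] := rfl
  have hv7 : ("⁏" : String).toList = ['⁏'] := rfl
  have hk8 : ("<" : String).toList = ['<'] := rfl
  have hv8 : ("❮" : String).toList = ['❮'] := rfl
  have hk9 : (">" : String).toList = ['>'] := rfl
  have hv9 : ("❯" : String).toList = ['❯'] := rfl
  rw [hk0, hv0, hk1, hv1, hk2, hv2, hk3, hv3, hk4, hv4, hk5, hv5, hk6, hv6, hk7, hv7, hk8, hv8, hk9, hv9]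
  rw [replace_single, replace_single, replace_single, replace_single, replace_single,
      replace_single, replace_single, replace_single, replace_single, replace_single]

lemma chain_append (x y : List Char) : pvChain (x ++ y) = pvChain x ++ pvChain y := by
  simp [chain_flat]

lemma chain_single (c : Char) : pvChain [c] = pvSubF c := by
  by_cases h1 : c = '['; · subst h1; decide
  by_cases h2 : c = ']'; · subst h2; decide
  by_cases h3 : c = '{'; · subst h3; decide
  by_cases h4 : c = '}'; · subst h4; decide
  by_cases h5 : c = '('; · subst h5; decide
  by_cases h6 : c = ')'; · subst h6; decide
  by_cases h7 : c = ','; · subst h7; decide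
  by_cases h8 : c = ';'; · subst h8; decide
  by_cases h9 : c = '<'; · subst h9; decide
  by_cases h10 : c = '>'; · subst h10; decide
  simp [chain_flat, pvG, pvSubF, pvSubChar, h1, h2, h3, h4, h5, h6, h7, h8, h9, h10]

lemma chain_eq_flatMap (s : List Char) : pvChain s = s.flatMap pvSubF := by
  induction s with
  | nil => decide
  | cons c t ih =>
    have h : (c :: t) = [c] ++ t := rfl
    rw [h, chain_append, chain_single, ih, List.flatMap_append]
    simp

-- the accumulator loop of B is a map
lemma foldl_append_map (f : Char → Char) :
    ∀ (s acc : List Char), s.foldl (fun out c => out ++ [f c]) acc = acc ++ s.map f := by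
  intro s
  induction s with
  | nil => intro acc; simp
  | cons c t ih => intro acc; simp [List.foldl, ih]

-- ===== VERDICT (by name: the statement is the Claim_ definition above) =====
theorem substitute_characters_spec : Claim_equal_substitute_characters := by
  intro s _
  unfold Spec_substitute_characters substitute_characters substitute_characters_alt
  apply String.toList_injective
  have hA : ((PySem.Dict.ofList pvSubsItems).items) = pvSubsItems := by decide
  rw [hA]
  have hchain : (pvSubsItems.foldl
      (fun formatted p => PySem.Str.replace formatted p.1 p.2) s).toList
      = pvChain s.toList := by
    simp only [pvChain, pvSubsItems, List.foldl, PySem.Str.toList_replace]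
  rw [hchain, chain_eq_flatMap, foldl_append_map]
  simp only [List.nil_append, String.toList_ofList]
  induction s.toList with
  | nil => rfl
  | cons c t ih => simp [pvSubF, ih]
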